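-- pv_equiv track=rewrite | github.com/Pusty/writeups | DEFCONCTFQuals2024/solve.py | tea_decrypt
-- ===== SOURCE A (Python) =====
-- def tea_decrypt(a, b, k):
--     sum = 0xC6EF3720
--     delta = 0x9E3779B9
--
--     for n in range(32, 0, -1):
--         b = (b - ((a << 4) + k[2] ^ a + sum ^ (a >> 5) + k[3]))&0xffffffff
--         a = (a - ((b << 4) + k[0] ^ b + sum ^ (b >> 5) + k[1]))&0xffffffff
--         sum = (sum - delta)&0xffffffff
--
--     return [a, b]
-- ===== SOURCE B (Python) =====
-- def tea_decrypt(a, b, k):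
--     # Alternative decomposition: recursive rounds with no running `sum`
--     # accumulator; the round constant is computed directly from the round
--     # index as (delta * n) & 0xffffffff.
--     def rounds(n, a, b):
--         if n == 0:
--             return [a, b]
--         s = (0x9E3779B9 * n) & 0xffffffff
--         b = (b - ((a << 4) + k[2] ^ a + s ^ (a >> 5) + k[3])) & 0xffffffff
--         a = (a - ((b << 4) + k[0] ^ b + s ^ (b >> 5) + k[1])) & 0xffffffff
--         return rounds(n - 1, a, b)
--     return rounds(32, a, b)
-- ===== Notes on version B (the rewrite author's own statement) =====
-- stated objective: alternative
-- what changed: B replaces A's for-loop with a decrement-in-lockstep sum accumulator by a recursive round function carrying only (a, b), computing each round constant in closed form as (delta * n) & 0xffffffff from the round index.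
import Mathlib
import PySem

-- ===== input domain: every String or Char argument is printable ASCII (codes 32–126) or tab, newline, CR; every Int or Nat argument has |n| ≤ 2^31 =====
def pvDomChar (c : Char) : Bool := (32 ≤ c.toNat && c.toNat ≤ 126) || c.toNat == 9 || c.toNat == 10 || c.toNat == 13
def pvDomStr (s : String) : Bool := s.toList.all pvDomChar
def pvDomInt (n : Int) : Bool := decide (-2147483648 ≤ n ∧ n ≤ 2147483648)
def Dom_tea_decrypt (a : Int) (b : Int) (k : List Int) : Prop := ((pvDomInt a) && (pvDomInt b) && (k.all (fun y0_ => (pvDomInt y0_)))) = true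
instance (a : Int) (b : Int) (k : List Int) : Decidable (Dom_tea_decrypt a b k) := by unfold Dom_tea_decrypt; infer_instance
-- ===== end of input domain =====

-- ===== PORT A =====
-- A: 32-round TEA decryption with a decrementing `sum` accumulator (k[i] ported
-- with pyGetD; Pre_ below requires len(k) >= 4, where Python A returns normally).
-- One iteration of A's for-loop body, on the state (a, b, sum); the loop
-- variable n is unused, exactly as in A.
def stepA (k : List Int) (st : Int × Int × Int) (_n : Int) : Int × Int × Int :=
  let a := st.1
  let b := st.2.1
  let sum := st.2.2
  let b := PySem.Int.band (b - (PySem.Int.bxor (PySem.Int.bxor ((a <<< (4:Nat)) + PySem.List.pyGetD k 2 0) (a + sum)) ((a >>> (5:Nat)) + PySem.List.pyGetD k 3 0))) 0xffffffff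
  let a := PySem.Int.band (a - (PySem.Int.bxor (PySem.Int.bxor ((b <<< (4:Nat)) + PySem.List.pyGetD k 0 0) (b + sum)) ((b >>> (5:Nat)) + PySem.List.pyGetD k 1 0))) 0xffffffff
  let sum := PySem.Int.band (sum - 0x9E3779B9) 0xffffffff
  (a, b, sum)

def tea_decrypt (a : Int) (b : Int) (k : List Int) : List Int :=
  let st := (PySem.List.pyRange 32 0 (-1)).foldl (stepA k) (a, b, 0xC6EF3720)
  [st.1, st.2.1]

-- ===== PORT B =====
-- B: recursive rounds carrying only (a, b); the round constant is computed in
-- closed form from the round index n as (delta * n) & 0xffffffff.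
def teaRounds (k : List Int) : Nat → Int → Int → List Int
  | 0, a, b => [a, b]
  | n+1, a, b =>
    let s := PySem.Int.band (0x9E3779B9 * ((n:Int)+1)) 0xffffffff
    let b := PySem.Int.band (b - (PySem.Int.bxor (PySem.Int.bxor ((a <<< (4:Nat)) + PySem.List.pyGetD k 2 0) (a + s)) ((a >>> (5:Nat)) + PySem.List.pyGetD k 3 0))) 0xffffffff
    let a := PySem.Int.band (a - (PySem.Int.bxor (PySem.Int.bxor ((b <<< (4:Nat)) + PySem.List.pyGetD k 0 0) (b + s)) ((b >>> (5:Nat)) + PySem.List.pyGetD k 1 0))) 0xffffffff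
    teaRounds k n a b

def tea_decrypt_alt (a : Int) (b : Int) (k : List Int) : List Int :=
  teaRounds k 32 a b

-- ===== PRECONDITION & SPEC =====
-- Pre_: Python A raises IndexError when len(k) < 4 (it reads k[0]..k[3]).
def Pre_tea_decrypt (a : Int) (b : Int) (k : List Int) : Prop := 4 ≤ k.length
instance (a : Int) (b : Int) (k : List Int) : Decidable (Pre_tea_decrypt a b k) := by unfold Pre_tea_decrypt; infer_instance
def pvWitness_tea_decrypt : Int × Int × List Int := (1, 2, [3, 4, 5, 6])
def Spec_tea_decrypt (a : Int) (b : Int) (k : List Int) (out : List Int) : Prop := out = tea_decrypt_alt a b k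
instance (a : Int) (b : Int) (k : List Int) (out : List Int) : Decidable (Spec_tea_decrypt a b k out) := by unfold Spec_tea_decrypt; infer_instance

-- ===== CLAIM (what is proved, stated in full; the proofs are below) =====
def Claim_equal_tea_decrypt : Prop := ∀ (a : Int) (b : Int) (k : List Int), Dom_tea_decrypt a b k → Pre_tea_decrypt a b k → Spec_tea_decrypt a b k (tea_decrypt a b k)

-- ===== LEMMAS AND PROOFS =====

-- Python's `x & 0xffffffff` is reduction mod 2^32.
theorem band_mask (x : Int) : PySem.Int.band x 4294967295 = x % 4294967296 := by
  unfold PySem.Int.band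
  have h : (4294967295 : Int).toNat = 2^32 - 1 := by decide
  split_ifs with h1 h2 h2
  · rw [h, Nat.and_two_pow_sub_one_eq_mod]
    omega
  · omega
  · rw [h, Nat.and_comm, Nat.and_two_pow_sub_one_eq_mod]
    omega
  · omega

-- [n, n-1, ..., 1]
def downList : Nat → List Int
  | 0 => []
  | n+1 => ((n:Int)+1) :: downList n

theorem pyRange_eq_downList : PySem.List.pyRange 32 0 (-1) = downList 32 := by decide

-- Invariant: with the sum seeded to (delta*n) mod 2^32, A's remaining fold over
-- [n, ..., 1] computes exactly B's recursion teaRounds k n.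
theorem loop_eq (k : List Int) : ∀ (n : Nat) (a b : Int),
    (let st := (downList n).foldl (stepA k) (a, b, (2654435769 * (n:Int)) % 4294967296)
     [st.1, st.2.1]) = teaRounds k n a b := by
  intro n
  induction n with
  | zero => intro a b; rfl
  | succ n ih =>
    intro a b
    show (let st := (downList n).foldl (stepA k) (stepA k (a, b, (2654435769 * ((n:Nat)+1:Int)) % 4294967296) (((n:Nat):Int)+1)); [st.1, st.2.1]) = teaRounds k (n+1) a b
    rw [teaRounds]
    have hs : PySem.Int.band (2654435769 * ((n:Int)+1)) 4294967295 = (2654435769 * ((n:Nat)+1:Int)) % 4294967296 := by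
      simp [band_mask]
    have hsum : PySem.Int.band ((2654435769 * ((n:Nat)+1:Int)) % 4294967296 - 2654435769) 4294967295
        = (2654435769 * (n:Int)) % 4294967296 := by
      rw [band_mask]
      have : (2654435769 * ((n:Nat)+1:Int)) = 2654435769 * (n:Int) + 2654435769 := by ring
      rw [this]
      omega
    simp only [stepA, hs, hsum]
    exact ih _ _

-- ===== VERDICT (by name: the statement is the Claim_ definition above) =====
theorem tea_decrypt_spec : Claim_equal_tea_decrypt := by
  intro a b k _ _
  show tea_decrypt a b k = tea_decrypt_alt a b k
  unfold tea_decrypt tea_decrypt_alt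
  rw [pyRange_eq_downList]
  have h32 : (3337565984 : Int) = 2654435769 * ((32:Nat):Int) % 4294967296 := by decide
  rw [h32]
  exact loop_eq k 32 a b
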